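-- pv_equiv track=rewrite | github.com/parkbum11/Algorithm | Programmers/기출/11.py | solution
-- ===== SOURCE A (Python) =====
-- def solution(program, flag_rules, commands):
--     answer = []
--     new_flag_rules = {}
--     null_flage_name = ''
--     check_num = '0123456789'
--     check_str = 'ABCDEFGHIJKLMNOPQRSTUVWXYZabcdefghijklmnopqrstuvwxyz'
--
--     for i in flag_rules:
--         flag_name, flag_argument_type = i.split()
--         new_flag_rules[flag_name] = flag_argument_type
--         if flag_argument_type == 'NULL': null_flage_name = flag_name
--
--     for c in commands:
--         result = True
--         new = c.split()
--         new_commands = []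
--         flag_argus = []
--
--         if new[0] != program:
--             answer.append(False)
--             continue
--
--         for n in new[1:]:
--             if n[0] == '-':
--                 if len(flag_argus) != 0:
--                     new_commands.append(flag_argus)
--                     flag_argus = []
--                 flag_argus.append(n)
--             else:
--                 flag_argus.append(n)
--         if len(flag_argus) != 0: new_commands.append(flag_argus)
--         for n in new_commands:
--             if n[0] == null_flage_name:
--                 if len(n) != 1:
--                     result = False
--                     break
--             else:
--                 if len(n) <= 1:
--                     result = False
--                     break
--                 if new_flag_rules[n[0]] == "NUMBER":
--                     if len(n) != 2:
--                         result = False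
--                         break
--                     else:
--                         for nn in n[1:]:
--                             for nnn in nn:
--                                 if nnn not in check_num:
--                                     result = False
--                                     break
--                 elif new_flag_rules[n[0]] == "STRING":
--                     if len(n) != 2:
--                         result = False
--                         break
--                     else:
--                         for nn in n[1:]:
--                             for nnn in nn:
--                                 if nnn not in check_str:
--                                     result = False
--                                     break
--             if result == False: break
--         answer.append(result)
--     return answer
-- ===== SOURCE B (Python) =====
-- def solution(program, flag_rules, commands):
--     pairs = [r.split() for r in flag_rules]
--     rules = dict(pairs)
--     null_name = ([''] + [n for n, t in pairs if t == 'NULL'])[-1]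
--     digits = '0123456789'
--     letters = 'ABCDEFGHIJKLMNOPQRSTUVWXYZabcdefghijklmnopqrstuvwxyz'
--
--     def ok(command):
--         toks = command.split()
--         if toks[0] != program:
--             return False
--         ts = toks[1:]
--         m = len(ts)
--         for i, t in enumerate(ts):
--             if i > 0 and not t.startswith('-'):
--                 continue  # argument token: judged from its flag's position
--             has_arg = i + 1 < m and not ts[i + 1].startswith('-')
--             if t == null_name:
--                 if has_arg:
--                     return False
--                 continue
--             if not has_arg:
--                 return False
--             typ = rules[t]
--             if typ == 'NUMBER':
--                 if (i + 2 < m and not ts[i + 2].startswith('-')) or any(ch not in digits for ch in ts[i + 1]):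
--                     return False
--             elif typ == 'STRING':
--                 if (i + 2 < m and not ts[i + 2].startswith('-')) or any(ch not in letters for ch in ts[i + 1]):
--                     return False
--         return True
--
--     return [ok(c) for c in commands]
-- ===== Notes on version B (the rewrite author's own statement) =====
-- stated objective: alternative
-- what changed: B never forms flag groups at all: it scans the flat token list once and judges each flag position by a purely local two-token lookahead window (next token non-dash = has an argument, token after that non-dash = too many arguments), skipping argument tokens, instead of A's build-the-list-of-groups-then-validate-each-group passes; the rule table is built by dict() over the split pairs with the NULL name taken as the last of a filtered list.
-- outside the precondition, e.g. on solution('run', ['-a NUMBER'], ['run -b -b x']): A returns [False], B returns [False]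
import Mathlib
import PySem

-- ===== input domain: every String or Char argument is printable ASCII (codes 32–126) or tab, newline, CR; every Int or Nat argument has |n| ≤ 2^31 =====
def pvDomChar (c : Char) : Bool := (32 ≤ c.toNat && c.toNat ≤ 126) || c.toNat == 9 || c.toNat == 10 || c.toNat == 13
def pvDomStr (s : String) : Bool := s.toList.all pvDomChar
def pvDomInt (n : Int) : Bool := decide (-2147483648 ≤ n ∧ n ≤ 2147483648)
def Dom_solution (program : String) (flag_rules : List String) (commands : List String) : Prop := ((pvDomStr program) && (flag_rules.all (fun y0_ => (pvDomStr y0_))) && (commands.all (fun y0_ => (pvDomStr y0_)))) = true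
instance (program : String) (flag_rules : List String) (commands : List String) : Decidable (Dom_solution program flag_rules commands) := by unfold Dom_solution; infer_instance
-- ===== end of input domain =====

-- B drops A's group-building pass entirely: it judges each flag position of the flat token list
-- by a local two-token lookahead window in a single scan; an alternative of the same cost.


-- ===== PORT A =====
-- A's first loop: dict of flag→type (a rule line that does not split into exactly two tokens
-- raises ValueError in Python — excluded by Pre_; the port skips it) plus the last NULL flag name.
def pvRulesState (flag_rules : List String) : PySem.Dict String String × String :=
  flag_rules.foldl (fun st i =>
    match PySem.Str.split₀ i with
    | [fn, ft] => (st.1.insert fn ft, if ft = "NULL" then fn else st.2)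
    | _ => st) (PySem.Dict.empty, "")

-- A's inner character loops: 'for nn in n[1:]: for nnn in nn: if nnn not in allowed: result=False; break'
-- (each nnn is a 1-character string, so Python's substring test is character membership).
def pvA_allowed (allowed : List Char) (args : List String) : Bool :=
  args.foldl (fun res s =>
    s.toList.foldl (fun r c => if !(allowed.contains c) then false else r) res) true

-- A's grouping loop over new[1:] building new_commands (flag_argus is the accumulator).
def pvA_build (ts : List String) (acc : List String) : List (List String) :=
  match ts with
  | [] => if acc.isEmpty then [] else [acc]
  | t :: ts' =>
    if PySem.Str.pyGet? t 0 = some '-' then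
      (if acc.isEmpty then pvA_build ts' [t] else acc :: pvA_build ts' [t])
    else pvA_build ts' (acc ++ [t])

-- A's validation loop over new_commands with 'result'/'break'.  Python looks the leader up with
-- new_flag_rules[n[0]] and raises KeyError when absent (excluded by Pre_); the port reads "" there.
def pvA_check (rules : PySem.Dict String String) (nullName : String) : List (List String) → Bool
  | [] => true
  | n :: rest =>
    if n.getD 0 "" = nullName then
      (if n.length ≠ 1 then false else pvA_check rules nullName rest)
    else if n.length ≤ 1 then false
    else if rules.getD (n.getD 0 "") "" = "NUMBER" then
      (if n.length ≠ 2 then false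
       else if pvA_allowed "0123456789".toList (n.drop 1) then pvA_check rules nullName rest
       else false)
    else if rules.getD (n.getD 0 "") "" = "STRING" then
      (if n.length ≠ 2 then false
       else if pvA_allowed "ABCDEFGHIJKLMNOPQRSTUVWXYZabcdefghijklmnopqrstuvwxyz".toList (n.drop 1)
       then pvA_check rules nullName rest else false)
    else pvA_check rules nullName rest

def solution (program : String) (flag_rules : List String) (commands : List String) : List Bool :=
  let st := pvRulesState flag_rules
  commands.foldl (fun answer c =>
    let new := PySem.Str.split₀ c
    -- new[0] raises IndexError on an empty command (excluded by Pre_); the port reads "" there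
    if new.getD 0 "" ≠ program then answer ++ [false]
    else answer ++ [pvA_check st.1 st.2 (pvA_build (new.drop 1) [])]) []

-- ===== PORT B =====
-- B's 'pairs = [r.split() for r in flag_rules]; rules = dict(pairs)' (a pair of the wrong shape
-- raises ValueError in dict() — excluded by Pre_; the port skips it).
def pvB_rules (pairs : List (List String)) : PySem.Dict String String :=
  pairs.foldl (fun d p => match p with | [n, t] => d.insert n t | _ => d) PySem.Dict.empty

-- B's "null_name = ([''] + [n for n, t in pairs if t == 'NULL'])[-1]"
def pvB_null (pairs : List (List String)) : String :=
  ("" :: pairs.filterMap (fun p => match p with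
    | [n, t] => if t = "NULL" then some n else none
    | _ => none)).getLastD ""

def pvDash (t : String) : Bool := PySem.Str.startswith t "-"

-- B's single for-loop over ts with enumerate: 'first' says i == 0; the lookahead window
-- ts[i+1] / ts[i+2] is the head / second element of the remaining list.  rules[t] raises
-- KeyError in Python when t is absent (excluded by Pre_); the port reads "" there.
def pvB_scan (rules : PySem.Dict String String) (nn : String) (first : Bool) :
    List String → Bool
  | [] => true
  | t :: ts =>
    if !first && !pvDash t then pvB_scan rules nn false ts
    else if t = nn then
      (if (match ts with | [] => false | x :: _ => !pvDash x) then false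
       else pvB_scan rules nn false ts)
    else if !(match ts with | [] => false | x :: _ => !pvDash x) then false
    else if rules.getD t "" = "NUMBER" then
      (if (match ts with | _ :: y :: _ => !pvDash y | _ => false) ||
          !((ts.getD 0 "").toList.all (fun c => "0123456789".toList.contains c))
       then false else pvB_scan rules nn false ts)
    else if rules.getD t "" = "STRING" then
      (if (match ts with | _ :: y :: _ => !pvDash y | _ => false) ||
          !((ts.getD 0 "").toList.all
            (fun c => "ABCDEFGHIJKLMNOPQRSTUVWXYZabcdefghijklmnopqrstuvwxyz".toList.contains c))
       then false else pvB_scan rules nn false ts)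
    else pvB_scan rules nn false ts

def pvB_ok (rules : PySem.Dict String String) (nn : String) (program : String)
    (toks : List String) : Bool :=
  -- toks[0] raises IndexError on an empty command (excluded by Pre_); the port reads "" there
  if toks.getD 0 "" ≠ program then false
  else pvB_scan rules nn true (toks.drop 1)

def solution_alt (program : String) (flag_rules : List String) (commands : List String) : List Bool :=
  let pairs := flag_rules.map PySem.Str.split₀
  let rules := pvB_rules pairs
  let nn := pvB_null pairs
  commands.map (fun c => pvB_ok rules nn program (PySem.Str.split₀ c))

-- ===== PRECONDITION & SPEC =====
def pvFlagNames (flag_rules : List String) : List String :=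
  flag_rules.filterMap (fun i => (PySem.Str.split₀ i).head?)

def pvNullName (flag_rules : List String) : String :=
  flag_rules.foldl (fun acc i =>
    match PySem.Str.split₀ i with
    | [fn, ft] => if ft = "NULL" then fn else acc
    | _ => acc) ""

-- Pre_ excludes exactly the inputs that make Python's A raise: a rule line that is not two
-- whitespace-separated tokens (ValueError), a command that splits into no tokens (IndexError),
-- and — slightly over-broadly — any command matching the program in which some flag-group leader
-- with an argument is neither the NULL flag nor a declared flag name (KeyError at rules[leader];
-- over-broad because A breaks on an earlier failing group and still returns False when the unknown
-- leader is never reached — B returns the same False there, see the cite).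
def Pre_solution (program : String) (flag_rules : List String) (commands : List String) : Prop :=
  (∀ i ∈ flag_rules, (PySem.Str.split₀ i).length = 2) ∧
  (∀ c ∈ commands, PySem.Str.split₀ c ≠ []) ∧
  (∀ c ∈ commands,
    (PySem.Str.split₀ c).getD 0 "" = program →
    ∀ j < ((PySem.Str.split₀ c).drop 1).length,
      (j = 0 ∨ PySem.Str.startswith (((PySem.Str.split₀ c).drop 1).getD j "") "-" = true) →
      PySem.Str.startswith (((PySem.Str.split₀ c).drop 1).getD (j+1) "-") "-" = false →
      ((PySem.Str.split₀ c).drop 1).getD j "" ≠ pvNullName flag_rules →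
      ((PySem.Str.split₀ c).drop 1).getD j "" ∈ pvFlagNames flag_rules)

instance (program : String) (flag_rules : List String) (commands : List String) :
    Decidable (Pre_solution program flag_rules commands) := by
  unfold Pre_solution; infer_instance

def pvWitness_solution : String × List String × List String :=
  ("run", ["-a NUMBER", "-b NULL"], ["run -a 5 -b", "bad cmd"])

def Spec_solution (program : String) (flag_rules : List String) (commands : List String) (out : List Bool) : Prop := out = solution_alt program flag_rules commands
instance (program : String) (flag_rules : List String) (commands : List String) (out : List Bool) : Decidable (Spec_solution program flag_rules commands out) := by unfold Spec_solution; infer_instance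

-- ===== CLAIM (what is proved, stated in full; the proofs are below) =====
def Claim_equal_solution : Prop := ∀ (program : String) (flag_rules : List String) (commands : List String), Dom_solution program flag_rules commands → Pre_solution program flag_rules commands → Spec_solution program flag_rules commands (solution program flag_rules commands)

-- ===== LEMMAS AND PROOFS =====

-- A's n[0] == '-' test agrees with B's startswith('-') on every string (both false on "").
theorem dashList (l : List Char) :
    (decide (PySem.List.pyGet? l 0 = some '-')) = PySem.Chars.startswith l ['-'] := by
  rcases l with _ | ⟨c, cs⟩
  · simp [PySem.List.pyGet?, PySem.List.pyIdx?, PySem.Chars.startswith, List.isPrefixOf]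
  · simp [PySem.List.pyGet?, PySem.List.pyIdx?, PySem.Chars.startswith, List.isPrefixOf]
    rw [BEq.comm, Bool.beq_eq_decide_eq]

theorem pyGet0_dash_eq_startswith (t : String) :
    (decide (PySem.Str.pyGet? t 0 = some '-')) = pvDash t := by
  have h : "-".toList = ['-'] := by decide
  simp only [pvDash, PySem.Str.pyGet?_eq, PySem.Str.startswith_eq, PySem.Chars.pyGet?, h]
  exact dashList t.toList

-- A's flagged character fold computes List.all.
theorem flagFold (p : Char → Bool) (b : Bool) (l : List Char) :
    l.foldl (fun r c => if !(p c) then false else r) b = (b && l.all p) := by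
  induction l generalizing b with
  | nil => simp
  | cons c cs ih =>
    simp only [List.foldl, List.all_cons]
    cases hc : p c <;> rw [ih] <;> simp_all

theorem pvA_allowed_singleton (allowed : List Char) (s : String) :
    pvA_allowed allowed [s] = s.toList.all (fun c => allowed.contains c) := by
  simp only [pvA_allowed, List.foldl]
  rw [flagFold, Bool.true_and]

-- A's validity test of a single group, as a closed Bool (proof-only helper).
def pvGroupCond (rules : PySem.Dict String String) (nn : String) (n : List String) : Bool :=
  if n.getD 0 "" = nn then (if n.length ≠ 1 then false else true)
  else if n.length ≤ 1 then false
  else if rules.getD (n.getD 0 "") "" = "NUMBER" then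
    (if n.length ≠ 2 then false
     else pvA_allowed "0123456789".toList (n.drop 1))
  else if rules.getD (n.getD 0 "") "" = "STRING" then
    (if n.length ≠ 2 then false
     else pvA_allowed "ABCDEFGHIJKLMNOPQRSTUVWXYZabcdefghijklmnopqrstuvwxyz".toList (n.drop 1))
  else true

theorem pvA_check_cons (rules : PySem.Dict String String) (nn : String)
    (g : List String) (gs : List (List String)) :
    pvA_check rules nn (g :: gs) =
      (if pvGroupCond rules nn g then pvA_check rules nn gs else false) := by
  simp only [pvA_check, pvGroupCond]
  split_ifs <;> simp_all

-- B skips a run of non-dash (argument) tokens.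
theorem pvB_skip (rules : PySem.Dict String String) (nn : String) (args ts : List String)
    (h : ∀ a ∈ args, pvDash a = false) :
    pvB_scan rules nn false (args ++ ts) = pvB_scan rules nn false ts := by
  induction args with
  | nil => rfl
  | cons a as ih =>
    have ha := h a (by simp)
    simp only [List.cons_append, pvB_scan, ha]
    exact ih (fun x hx => h x (by simp [hx]))

-- A's builder appends a run of non-dash tokens to the accumulator.
theorem pvA_build_args (args ts acc : List String) (h : ∀ a ∈ args, pvDash a = false) :
    pvA_build (args ++ ts) acc = pvA_build ts (acc ++ args) := by
  induction args generalizing acc with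
  | nil => simp
  | cons a as ih =>
    have ha : ¬ (PySem.Str.pyGet? a 0 = some '-') := by
      have := pyGet0_dash_eq_startswith a
      rw [h a (by simp)] at this
      simpa using this
    simp only [List.cons_append, pvA_build]
    rw [if_neg ha, ih (acc ++ [a]) (fun x hx => h x (by simp [hx])), List.append_assoc]
    rfl

theorem pvA_build_close (rest : List String) (t : String) (args : List String)
    (hrest : ∀ r ∈ rest.head?, pvDash r = true) :
    pvA_build rest (t :: args) = (t :: args) :: pvA_build rest [] := by
  cases rest with
  | nil => simp [pvA_build]
  | cons r rest' =>
    have hr : PySem.Str.pyGet? r 0 = some '-' := by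
      have hd := hrest r (by simp)
      have := pyGet0_dash_eq_startswith r
      rw [hd] at this
      simpa using this
    have hr2 : PySem.List.pyGet? r.toList 0 = some '-' := by
      simpa [PySem.Str.pyGet?_eq, PySem.Chars.pyGet?] using hr
    simp [pvA_build, hr, hr2]

-- the head of a dropWhile result falsifies the predicate
theorem dropWhile_head_false {α : Type} (p : α → Bool) :
    ∀ (ts : List α) (r : α) (rest' : List α), ts.dropWhile p = r :: rest' → p r = false := by
  intro ts
  induction ts with
  | nil => intro r rest' h; simp [List.dropWhile] at h
  | cons a ts' ih =>
    intro r rest' h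
    by_cases hp : p a = true
    · rw [List.dropWhile_cons_of_pos hp] at h
      exact ih r rest' h
    · rw [List.dropWhile_cons_of_neg hp] at h
      cases h
      simpa using hp

set_option maxHeartbeats 2000000 in
-- one-step unfolding of pvB_scan on a cons (definitional)
theorem pvB_scan_cons (rules : PySem.Dict String String) (nn : String) (first : Bool)
    (t : String) (ts : List String) :
    pvB_scan rules nn first (t :: ts) =
      (if !first && !pvDash t then pvB_scan rules nn false ts
       else if t = nn then
         (if (match ts with | [] => false | x :: _ => !pvDash x) then false
          else pvB_scan rules nn false ts)
       else if !(match ts with | [] => false | x :: _ => !pvDash x) then false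
       else if rules.getD t "" = "NUMBER" then
         (if (match ts with | _ :: y :: _ => !pvDash y | _ => false) ||
             !((ts.getD 0 "").toList.all (fun c => "0123456789".toList.contains c))
          then false else pvB_scan rules nn false ts)
       else if rules.getD t "" = "STRING" then
         (if (match ts with | _ :: y :: _ => !pvDash y | _ => false) ||
             !((ts.getD 0 "").toList.all
               (fun c => "ABCDEFGHIJKLMNOPQRSTUVWXYZabcdefghijklmnopqrstuvwxyz".toList.contains c))
          then false else pvB_scan rules nn false ts)
       else pvB_scan rules nn false ts) := rfl

-- The key fusion: from any leader token t, A's build-then-check of the rest of the command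
-- equals B's windowed scan.
theorem pvMain (rules : PySem.Dict String String) (nn : String) :
    ∀ (fuel : ℕ) (ts : List String), ts.length ≤ fuel →
    ∀ (t : String) (first : Bool), (first = true ∨ pvDash t = true) →
    pvB_scan rules nn first (t :: ts) = pvA_check rules nn (pvA_build ts [t]) := by
  intro fuel
  induction fuel with
  | zero =>
    intro ts hts t first hb
    have : ts = [] := by cases ts <;> simp_all
    subst this
    rcases hb with hb | hb <;>
      simp [pvB_scan, pvA_build, pvA_check, hb]
  | succ n ih =>
    intro ts hts t first hb
    obtain ⟨args, rest, hargs, hrest⟩ :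
        ∃ args rest, args = ts.takeWhile (fun a => !pvDash a) ∧
          rest = ts.dropWhile (fun a => !pvDash a) := ⟨_, _, rfl, rfl⟩
    have hsplit : ts = args ++ rest := by
      rw [hargs, hrest]; exact (List.takeWhile_append_dropWhile).symm
    have hargsnd : ∀ a ∈ args, pvDash a = false := by
      intro a ha
      rw [hargs] at ha
      have := List.mem_takeWhile_imp ha
      simpa using this
    have hrestd : ∀ r ∈ rest.head?, pvDash r = true := by
      intro r hr
      cases hcr2 : rest with
      | nil => rw [hcr2] at hr; simp at hr
      | cons r0 rest' =>
        have hdw : ts.dropWhile (fun a => !pvDash a) = r0 :: rest' := by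
          rw [← hrest]; exact hcr2
        have hfalse := dropWhile_head_false (fun a => !pvDash a) ts r0 rest' hdw
        rw [hcr2] at hr; simp at hr; subst hr
        simpa using hfalse
    -- continuation equality
    have hK : pvB_scan rules nn false rest = pvA_check rules nn (pvA_build rest []) := by
      cases hcr : rest with
      | nil => simp [pvB_scan, pvA_build, pvA_check]
      | cons r rest' =>
        have hd : pvDash r = true := by
          have := hrestd r (by simp [hcr]); exact this
        have hlen : rest'.length ≤ n := by
          have h1 : ts.length ≤ n + 1 := hts
          have : args.length + (r :: rest').length = ts.length := by
            rw [hsplit, hcr]; simp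
          simp at this; omega
        have hbuild : pvA_build (r :: rest') [] = pvA_build rest' [r] := by
          by_cases hg : PySem.Str.pyGet? r 0 = some '-'
          · simp [pvA_build, hg]
          · simp [pvA_build, hg]
        rw [hbuild, ih rest' hlen r false (Or.inr hd)]
    -- A side
    have hA : pvA_build ts [t] = (t :: args) :: pvA_build rest [] := by
      rw [hsplit, pvA_build_args args rest [t] hargsnd]
      exact pvA_build_close rest t args hrestd
    rw [hA, pvA_check_cons, ← hK]
    -- B side: the leader branch fires
    have hbranch : (!first && !pvDash t) = false := by
      rcases hb with hb | hb <;> simp [hb]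
    rw [hsplit]
    clear ih hts hA hK hb hargs hrest hsplit
    rcases hcA : args with _ | ⟨a, _ | ⟨b, args2⟩⟩ <;> subst hcA
    · -- no argument tokens: hasArg = false
      simp only [List.nil_append]
      cases hcr : rest with
      | nil =>
        by_cases hnn : t = nn
        · subst hnn; simp [pvB_scan, pvGroupCond, hbranch]
        · simp [pvB_scan, pvGroupCond, hbranch, hnn]
      | cons r rest' =>
        have hdr : pvDash r = true := hrestd r (by simp [hcr])
        by_cases hnn : t = nn
        · subst hnn; simp [pvB_scan, pvGroupCond, hbranch, hdr]
        · simp [pvB_scan, pvGroupCond, hbranch, hnn, hdr]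
    · -- exactly one argument token a
      have hda : pvDash a = false := hargsnd a (by simp)
      simp only [List.cons_append, List.nil_append]
      cases hcr : rest with
      | nil =>
        by_cases hnn : t = nn
        · subst hnn; simp [pvB_scan, pvGroupCond, hbranch, hda]
        · have hcont : pvB_scan rules nn false [a] = true := by
            simp [pvB_scan, hda]
          conv_lhs => rw [pvB_scan_cons]
          simp only [hcont, pvGroupCond, hbranch, Bool.false_eq_true, if_false, hda,
            Bool.not_false, Bool.not_true, Bool.and_self, if_true, Bool.false_or,
            List.getD_cons_zero, List.getD_cons_succ, List.length_cons, List.length_nil,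
            List.drop_succ_cons, List.drop_zero, pvA_allowed_singleton, if_neg hnn]
          generalize (a.toList.all fun c => "0123456789".toList.contains c) = nb
          generalize (a.toList.all
            (fun c => "ABCDEFGHIJKLMNOPQRSTUVWXYZabcdefghijklmnopqrstuvwxyz".toList.contains c)) = sb
          split_ifs <;> first | rfl | simp_all [pvB_scan]
      | cons r rest' =>
        have hdr : pvDash r = true := hrestd r (by simp [hcr])
        by_cases hnn : t = nn
        · subst hnn; simp [pvB_scan, pvGroupCond, hbranch, hda, hdr]
        · have hcont : pvB_scan rules nn false (a :: r :: rest') =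
              pvB_scan rules nn false (r :: rest') :=
            pvB_skip rules nn [a] (r :: rest') (by simp [hda])
          conv_lhs => rw [pvB_scan_cons]
          simp only [hcont, pvGroupCond, hbranch, Bool.false_eq_true, if_false, hda,
            hdr, Bool.not_false, Bool.not_true, Bool.and_self, if_true, Bool.false_or,
            List.getD_cons_zero, List.getD_cons_succ, List.length_cons, List.length_nil,
            List.drop_succ_cons, List.drop_zero, pvA_allowed_singleton, if_neg hnn]
          generalize (a.toList.all fun c => "0123456789".toList.contains c) = nb
          generalize (a.toList.all
            (fun c => "ABCDEFGHIJKLMNOPQRSTUVWXYZabcdefghijklmnopqrstuvwxyz".toList.contains c)) = sb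
          generalize pvB_scan rules nn false (r :: rest') = K
          split_ifs <;> first | rfl | simp_all
    · -- two or more argument tokens: hasArg = true and the third-token test fires
      have hda : pvDash a = false := hargsnd a (by simp)
      have hdb : pvDash b = false := hargsnd b (by simp)
      have hskip2 : pvB_scan rules nn false (args2 ++ rest) =
          pvB_scan rules nn false rest :=
        pvB_skip rules nn args2 rest (fun x hx => hargsnd x (by simp [hx]))
      have hlen1 : ¬ ((t :: a :: b :: args2).length ≤ 1) := by simp
      have hlen2 : ¬ ((t :: a :: b :: args2).length = 2) := by
        simp only [List.length_cons]
        omega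
      simp only [List.cons_append, List.nil_append]
      by_cases hnn : t = nn
      · subst hnn
        conv_lhs => rw [pvB_scan_cons]
        simp only [pvGroupCond, hbranch, Bool.false_eq_true, if_false, hda, hdb,
          Bool.not_false, Bool.not_true, Bool.and_self, if_true, if_pos rfl,
          List.getD_cons_zero]
        split_ifs <;> first | rfl | simp_all
      · have hcont : pvB_scan rules nn false (a :: b :: (args2 ++ rest)) =
            pvB_scan rules nn false rest := by
          have h0 := pvB_skip rules nn [a, b] (args2 ++ rest) (by simp [hda, hdb])
          simpa [hskip2] using h0
        conv_lhs => rw [pvB_scan_cons]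
        simp only [hcont, pvGroupCond, hbranch, Bool.false_eq_true, if_false, hda, hdb,
          Bool.not_false, Bool.not_true, Bool.and_self, if_true, Bool.false_or,
          List.getD_cons_zero, if_neg hnn, if_neg hlen1, if_neg (by simpa using hlen2 :
            ¬ ((t :: a :: b :: args2).length = 2))]
        generalize pvB_scan rules nn false rest = K
        split_ifs <;> first | rfl | simp_all

-- generalized-initial-state version of pvB_rules (proof-only helper)
def pvB_rules' (pairs : List (List String)) (d : PySem.Dict String String) :
    PySem.Dict String String :=
  pairs.foldl (fun d p => match p with | [n, t] => d.insert n t | _ => d) d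

theorem pvB_rules_eq' (pairs : List (List String)) :
    pvB_rules pairs = pvB_rules' pairs PySem.Dict.empty := rfl

-- B's rule dict over the split pairs equals the first component of A's rule fold,
-- and B's last-NULL-of-a-filtered-list equals A's running null name (no side condition needed:
-- both ports skip a rule line that does not split in two).
theorem rules_fst_eq (flag_rules : List String) :
    pvB_rules (flag_rules.map PySem.Str.split₀) = (pvRulesState flag_rules).1 := by
  have gen : ∀ (fr : List String) (d : PySem.Dict String String) (s : String),
      pvB_rules' (fr.map PySem.Str.split₀) d =
        (fr.foldl (fun st i =>
          match PySem.Str.split₀ i with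
          | [fn, ft] => (st.1.insert fn ft, if ft = "NULL" then fn else st.2)
          | _ => st) (d, s)).1 := by
    intro fr
    induction fr with
    | nil => intro d s; rfl
    | cons i fr' ih =>
      intro d s
      simp only [List.map_cons, pvB_rules', List.foldl_cons]
      cases hsp : PySem.Str.split₀ i with
      | nil => exact ih d s
      | cons x l =>
        cases l with
        | nil => exact ih d s
        | cons y l' =>
          cases l' with
          | nil => exact ih (d.insert x y) _
          | cons z l'' => exact ih d s
  rw [pvB_rules_eq']
  exact gen flag_rules PySem.Dict.empty ""

theorem rules_snd_eq (flag_rules : List String) :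
    pvB_null (flag_rules.map PySem.Str.split₀) = (pvRulesState flag_rules).2 := by
  have gen : ∀ (fr : List String) (d : PySem.Dict String String) (s : String),
      ((fr.map PySem.Str.split₀).filterMap (fun p => match p with
        | [n, t] => if t = "NULL" then some n else none
        | _ => none)).getLastD s =
      (fr.foldl (fun st i =>
        match PySem.Str.split₀ i with
        | [fn, ft] => (st.1.insert fn ft, if ft = "NULL" then fn else st.2)
        | _ => st) (d, s)).2 := by
    intro fr
    induction fr with
    | nil => intro d s; rfl
    | cons i fr' ih =>
      intro d s
      simp only [List.map_cons, List.filterMap_cons, List.foldl_cons]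
      cases hsp : PySem.Str.split₀ i with
      | nil => exact ih d s
      | cons x l =>
        cases l with
        | nil => exact ih d s
        | cons y l' =>
          cases l' with
          | nil =>
            by_cases hnull : y = "NULL"
            · subst hnull
              simp only [reduceIte, List.getLastD_cons]
              exact ih (d.insert x "NULL") x
            · simp only [if_neg hnull]
              exact ih (d.insert x y) s
          | cons z l'' => exact ih d s
  unfold pvB_null
  rw [List.getLastD_cons]
  exact gen flag_rules PySem.Dict.empty ""

-- B's scan from the start of new[1:] equals checking A's built group list.
theorem scan_eq_check (rules : PySem.Dict String String) (nn : String) (l : List String) :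
    pvB_scan rules nn true l = pvA_check rules nn (pvA_build l []) := by
  cases l with
  | nil => simp [pvB_scan, pvA_build, pvA_check]
  | cons t ts =>
    have hb0 : pvA_build (t :: ts) [] = pvA_build ts [t] := by
      by_cases hg : PySem.Str.pyGet? t 0 = some '-'
      · simp [pvA_build, hg]
      · simp [pvA_build, hg]
    rw [hb0, pvMain rules nn ts.length ts le_rfl t true (Or.inl rfl)]

theorem solution_eq_alt (program : String) (flag_rules : List String) (commands : List String) :
    solution program flag_rules commands = solution_alt program flag_rules commands := by
  have hbody : ∀ (answer : List Bool) (c : String),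
      (if (PySem.Str.split₀ c).getD 0 "" ≠ program then answer ++ [false]
       else answer ++ [pvA_check (pvRulesState flag_rules).1 (pvRulesState flag_rules).2
         (pvA_build ((PySem.Str.split₀ c).drop 1) [])]) =
      answer ++ [pvB_ok (pvB_rules (flag_rules.map PySem.Str.split₀))
        (pvB_null (flag_rules.map PySem.Str.split₀)) program (PySem.Str.split₀ c)] := by
    intro answer c
    simp only [pvB_ok, rules_fst_eq, rules_snd_eq, scan_eq_check]
    split_ifs <;> simp_all
  simp only [solution, solution_alt, hbody, PySem.List.foldl_append_singleton_eq_map,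
    List.nil_append]

-- ===== VERDICT (by name: the statement is the Claim_ definition above) =====
theorem solution_spec : Claim_equal_solution := by
  intro program flag_rules commands _ _
  exact solution_eq_alt program flag_rules commands
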